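-- pv_equiv track=rewrite | github.com/akhilesh-desai/Movie-Script-Generator | generate.py | format_script_for_display
-- ===== SOURCE A (Python) =====
-- def format_script_for_display(script: str) -> str:
--     """Format the script by cleaning up special tokens and formatting"""
--     # Remove the initial prompt/genre specification if present
--     script = script.split("[/GENRE]")[-1].strip()
--
--     # Basic formatting
--     script = script.replace("[SCENE]", "\nSCENE: ")
--     script = script.replace("[/SCENE]", "\n")
--     script = script.replace("[ACTION]", "\nACTION: ")
--     script = script.replace("[/ACTION]", "\n")
--     script = script.replace("[CHARACTER]", "\nCHARACTER: ")
--     script = script.replace("[/CHARACTER]", "\n")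
--     script = script.replace("[DIALOGUE]", "\nDIALOGUE: ")
--     script = script.replace("[/DIALOGUE]", "\n")
--
--     # Remove any remaining special tokens
--     script = script.replace("<s>", "").replace("</s>", "")
--
--     # Clean up multiple newlines
--     script = "\n".join(line.strip() for line in script.split("\n") if line.strip())
--
--     return script
-- ===== SOURCE B (Python) =====
-- _TABLE = [
--     ("[SCENE]", "\nSCENE: "),
--     ("[/SCENE]", "\n"),
--     ("[ACTION]", "\nACTION: "),
--     ("[/ACTION]", "\n"),
--     ("[CHARACTER]", "\nCHARACTER: "),
--     ("[/CHARACTER]", "\n"),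
--     ("[DIALOGUE]", "\nDIALOGUE: "),
--     ("[/DIALOGUE]", "\n"),
-- ]
--
--
-- def format_script_for_display(script: str) -> str:
--     """Format the script by cleaning up special tokens and formatting"""
--     s = script.split("[/GENRE]")[-1].strip()
--
--     # One table-driven pass replaces all eight bracket tokens at once.
--     out = []
--     i, n = 0, len(s)
--     while i < n:
--         hit = None
--         for tok, rep in _TABLE:
--             if s.startswith(tok, i):
--                 hit = (tok, rep)
--                 break
--         if hit is not None:
--             out.append(hit[1])
--             i += len(hit[0])
--         else:
--             out.append(s[i])
--             i += 1
--     s = "".join(out)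
--
--     # Kept sequential on purpose: deleting "<s>" may uncover a "</s>".
--     s = s.replace("<s>", "").replace("</s>", "")
--
--     return "\n".join(line.strip() for line in s.split("\n") if line.strip())
-- ===== Notes on version B (the rewrite author's own statement) =====
-- stated objective: alternative
-- what changed: The eight sequential bracket-token .replace() passes are replaced by a single left-to-right table-driven scan that matches and substitutes all eight tokens in one pass over the string (the <s>/</s> removals stay sequential because deleting <s> can uncover a </s>).
import Mathlib
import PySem

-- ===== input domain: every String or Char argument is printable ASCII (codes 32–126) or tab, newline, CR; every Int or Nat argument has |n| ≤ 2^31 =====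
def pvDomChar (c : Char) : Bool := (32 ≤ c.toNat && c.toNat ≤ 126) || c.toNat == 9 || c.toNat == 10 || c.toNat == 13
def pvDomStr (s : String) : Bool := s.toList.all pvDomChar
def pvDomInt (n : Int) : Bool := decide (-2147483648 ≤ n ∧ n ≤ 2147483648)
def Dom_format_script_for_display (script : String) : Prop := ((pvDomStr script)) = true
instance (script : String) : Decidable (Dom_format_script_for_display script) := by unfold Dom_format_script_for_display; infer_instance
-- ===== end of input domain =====

-- B replaces the eight sequential bracket-token `.replace` passes by one table-driven
-- left-to-right scan (the `<s>`/`</s>` removals stay sequential, since deleting `<s>`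
-- can uncover a `</s>`); objective: alternative (one pass instead of eight).

-- ===== PORT A =====
-- Shared outer steps: both Pythons contain the identical lines
-- `script.split("[/GENRE]")[-1].strip()` and the final line normalization.
-- `splitOn` always returns at least one piece, so Python's `[-1]` is `getLastD`.
def pvPreprocess (script : String) : List Char :=
  PySem.Chars.strip ((PySem.Chars.splitOn script.toList "[/GENRE]".toList).getLastD [])

def pvNormalize (s : List Char) : String :=
  String.ofList (PySem.Chars.join "\n".toList
    (((PySem.Chars.splitOn s "\n".toList).map PySem.Chars.strip).filter (fun l => !l.isEmpty)))

def format_script_for_display (script : String) : String :=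
  let s0 := pvPreprocess script
  let s1 := PySem.Chars.replace s0 "[SCENE]".toList "\nSCENE: ".toList
  let s2 := PySem.Chars.replace s1 "[/SCENE]".toList "\n".toList
  let s3 := PySem.Chars.replace s2 "[ACTION]".toList "\nACTION: ".toList
  let s4 := PySem.Chars.replace s3 "[/ACTION]".toList "\n".toList
  let s5 := PySem.Chars.replace s4 "[CHARACTER]".toList "\nCHARACTER: ".toList
  let s6 := PySem.Chars.replace s5 "[/CHARACTER]".toList "\n".toList
  let s7 := PySem.Chars.replace s6 "[DIALOGUE]".toList "\nDIALOGUE: ".toList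
  let s8 := PySem.Chars.replace s7 "[/DIALOGUE]".toList "\n".toList
  let s9 := PySem.Chars.replace s8 "<s>".toList "".toList
  let s10 := PySem.Chars.replace s9 "</s>".toList "".toList
  pvNormalize s10

-- ===== PORT B =====
def pvTable : List (List Char × List Char) :=
  [("[SCENE]".toList, "\nSCENE: ".toList),
   ("[/SCENE]".toList, "\n".toList),
   ("[ACTION]".toList, "\nACTION: ".toList),
   ("[/ACTION]".toList, "\n".toList),
   ("[CHARACTER]".toList, "\nCHARACTER: ".toList),
   ("[/CHARACTER]".toList, "\n".toList),
   ("[DIALOGUE]".toList, "\nDIALOGUE: ".toList),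
   ("[/DIALOGUE]".toList, "\n".toList)]

-- the `for tok, rep in _TABLE: if s.startswith(tok, i): hit = (tok, rep); break` loop
def pvFindTok : List (List Char × List Char) → List Char → Option (List Char × List Char)
  | [], _ => none
  | (t, r) :: rest, s => if t.isPrefixOf s then some (t, r) else pvFindTok rest s

-- the `while i < n` scan; on a hit it advances by len(tok) (tokens are nonempty literals)
def pvScan (T : List (List Char × List Char)) : List Char → List Char
  | [] => []
  | c :: cs =>
    match pvFindTok T (c :: cs) with
    | some (t, r) => r ++ pvScan T (cs.drop (t.length - 1))
    | none => c :: pvScan T cs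
termination_by s => s.length
decreasing_by
  · simp only [List.length_drop, List.length_cons]; omega
  · simp

def format_script_for_display_alt (script : String) : String :=
  let s0 := pvPreprocess script
  let s1 := pvScan pvTable s0
  let s2 := PySem.Chars.replace s1 "<s>".toList "".toList
  let s3 := PySem.Chars.replace s2 "</s>".toList "".toList
  pvNormalize s3

-- ===== PRECONDITION & SPEC =====
def Spec_format_script_for_display (script : String) (out : String) : Prop := out = format_script_for_display_alt script
instance (script : String) (out : String) : Decidable (Spec_format_script_for_display script out) := by unfold Spec_format_script_for_display; infer_instance

-- ===== CLAIM (what is proved, stated in full; the proofs are below) =====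
def Claim_equal_format_script_for_display : Prop := ∀ (script : String), Dom_format_script_for_display script → Spec_format_script_for_display script (format_script_for_display script)

-- ===== LEMMAS AND PROOFS =====

-- Replace, written as the plain head recursion the proofs case on.
def pvRep1 (old new : List Char) : List Char → List Char
  | [] => []
  | c :: cs =>
    if old.isPrefixOf (c :: cs) then new ++ pvRep1 old new (cs.drop (old.length - 1))
    else c :: pvRep1 old new cs
termination_by s => s.length
decreasing_by
  · simp only [List.length_drop, List.length_cons]; omega
  · simp

theorem pvReplaceGo_eq (old new : List Char) (hold : old ≠ []) :
    ∀ (fuel : Nat) (l acc : List Char), l.length ≤ fuel →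
      PySem.Chars.replace.go old new fuel l acc = acc.reverse ++ pvRep1 old new l := by
  intro fuel
  induction fuel with
  | zero =>
    intro l acc hl
    have : l = [] := by
      cases l with
      | nil => rfl
      | cons c t => simp at hl
    subst this
    simp [PySem.Chars.replace.go.eq_1, pvRep1]
  | succ fuel ih =>
    intro l acc hl
    cases l with
    | nil => simp [PySem.Chars.replace.go.eq_2 old new (fuel + 1) acc (by omega), pvRep1]
    | cons c t =>
      have hog : 1 ≤ old.length := by
        cases old with
        | nil => exact absurd rfl hold
        | cons a b => simp
      rw [PySem.Chars.replace.go.eq_3]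
      by_cases h : old.isPrefixOf (c :: t) = true
      · rw [if_pos h]
        have hd : List.drop old.length (c :: t) = t.drop (old.length - 1) := by
          cases old with
          | nil => exact absurd rfl hold
          | cons a b => simp
        have hlen : (List.drop old.length (c :: t)).length ≤ fuel := by
          simp only [List.length_drop, List.length_cons] at *
          omega
        rw [ih _ _ hlen, hd]
        have : pvRep1 old new (c :: t) = new ++ pvRep1 old new (t.drop (old.length - 1)) := by
          rw [pvRep1]; rw [if_pos h]
        rw [this]
        simp
      · rw [if_neg h]
        have hlen : t.length ≤ fuel := by
          simp only [List.length_cons] at hl; omega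
        rw [ih _ _ hlen]
        have : pvRep1 old new (c :: t) = c :: pvRep1 old new t := by
          rw [pvRep1]; rw [if_neg h]
        rw [this]
        simp

theorem pvReplace_eq (old new s : List Char) (hold : old ≠ []) :
    PySem.Chars.replace s old new = pvRep1 old new s := by
  rw [PySem.Chars.replace]
  rw [if_neg (by simp [List.isEmpty_iff, hold])]
  simpa using pvReplaceGo_eq old new hold s.length s [] le_rfl

-- token / replacement shape conditions that make the eight passes independent
def pvGoodTok (t : List Char) : Bool :=
  !t.isEmpty && (t.head? == some '[') && t.tail.all (fun c => c ≠ '[') && t.all (fun c => c ≠ '\n')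

def pvGoodRep (r : List Char) : Bool :=
  !r.isEmpty && (r.head? == some '\n') && r.all (fun c => c ≠ '[')

def pvGoodTab (T : List (List Char × List Char)) : Prop :=
  (∀ p ∈ T, pvGoodTok p.1 = true ∧ pvGoodRep p.2 = true) ∧
  T.Pairwise (fun p q => ¬ p.1 <+: q.1 ∧ ¬ q.1 <+: p.1)

-- ---- basic unfolding lemmas ----
theorem pvScan_nil (T : List (List Char × List Char)) : pvScan T [] = [] := by
  rw [pvScan]

theorem pvScan_cons_some {T : List (List Char × List Char)} {c : Char} {cs t r : List Char}
    (h : pvFindTok T (c :: cs) = some (t, r)) :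
    pvScan T (c :: cs) = r ++ pvScan T (cs.drop (t.length - 1)) := by
  rw [pvScan, h]

theorem pvScan_cons_none {T : List (List Char × List Char)} {c : Char} {cs : List Char}
    (h : pvFindTok T (c :: cs) = none) :
    pvScan T (c :: cs) = c :: pvScan T cs := by
  rw [pvScan, h]

theorem pvRep1_nil (old new : List Char) : pvRep1 old new [] = [] := by
  rw [pvRep1]

theorem pvRep1_cons_pos {old : List Char} (new : List Char) {c : Char} {cs : List Char}
    (h : old.isPrefixOf (c :: cs) = true) :
    pvRep1 old new (c :: cs) = new ++ pvRep1 old new (cs.drop (old.length - 1)) := by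
  rw [pvRep1, if_pos h]

theorem pvRep1_cons_neg {old : List Char} (new : List Char) {c : Char} {cs : List Char}
    (h : ¬ old.isPrefixOf (c :: cs) = true) :
    pvRep1 old new (c :: cs) = c :: pvRep1 old new cs := by
  rw [pvRep1, if_neg h]

-- ---- pvFindTok characterisations ----
theorem pvFindTok_none_iff {T : List (List Char × List Char)} {s : List Char} :
    pvFindTok T s = none ↔ ∀ p ∈ T, ¬ p.1 <+: s := by
  induction T with
  | nil => simp [pvFindTok]
  | cons q rest ih =>
    obtain ⟨t, r⟩ := q
    by_cases h : t.isPrefixOf s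
    · simp [pvFindTok, h, List.isPrefixOf_iff_prefix.mp h]
    · simp only [pvFindTok, if_neg h, ih, List.mem_cons]
      constructor
      · rintro hall p (rfl | hp)
        · exact fun hc => h (List.isPrefixOf_iff_prefix.mpr hc)
        · exact hall p hp
      · intro hall p hp
        exact hall p (Or.inr hp)

theorem pvFindTok_mem {T : List (List Char × List Char)} {s : List Char}
    {p : List Char × List Char} (h : pvFindTok T s = some p) : p ∈ T ∧ p.1 <+: s := by
  induction T with
  | nil => simp [pvFindTok] at h
  | cons q rest ih =>
    obtain ⟨t, r⟩ := q
    by_cases hq : t.isPrefixOf s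
    · simp only [pvFindTok, if_pos hq] at h
      cases h
      exact ⟨List.mem_cons_self, List.isPrefixOf_iff_prefix.mp hq⟩
    · simp only [pvFindTok, if_neg hq] at h
      obtain ⟨h1, h2⟩ := ih h
      exact ⟨List.mem_cons_of_mem _ h1, h2⟩

-- ---- shape facts ----
theorem pvGoodTok_iff {t : List Char} :
    pvGoodTok t = true ↔
      t ≠ [] ∧ t.head? = some '[' ∧ (∀ c ∈ t.tail, c ≠ '[') ∧ (∀ c ∈ t, c ≠ '\n') := by
  simp [pvGoodTok, List.all_eq_true, and_assoc]

theorem pvGoodRep_iff {r : List Char} :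
    pvGoodRep r = true ↔ r ≠ [] ∧ r.head? = some '\n' ∧ (∀ c ∈ r, c ≠ '[') := by
  simp [pvGoodRep, List.all_eq_true, and_assoc]

-- a token (head '[') is no prefix of a list whose head is not '['
theorem pv_not_prefix_of_head {ti y w : List Char}
    (h1 : ti.head? = some '[') (h2 : y ≠ []) (h3 : y.head? ≠ some '[') :
    ¬ ti <+: (y ++ w) := by
  cases ti with
  | nil => simp at h1
  | cons a τ =>
    cases y with
    | nil => exact absurd rfl h2
    | cons b y' =>
      simp only [List.head?_cons, Option.some.injEq] at h1 h3
      subst h1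
      simp only [List.cons_append, List.cons_prefix_cons]
      rintro ⟨rfl, -⟩
      exact h3 rfl

-- no token matches strictly inside another token (tokens carry '[' only at the head)
theorem pv_no_match_inside_tok {ti tj w : List Char} {p : Nat}
    (hi : pvGoodTok ti = true) (hj : pvGoodTok tj = true)
    (hp1 : 1 ≤ p) (hp : p < tj.length) : ¬ ti <+: (tj.drop p ++ w) := by
  obtain ⟨hi1, hi2, -, -⟩ := pvGoodTok_iff.mp hi
  obtain ⟨-, -, hj3, -⟩ := pvGoodTok_iff.mp hj
  apply pv_not_prefix_of_head hi2
  · intro hnil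
    have := List.length_drop (l := tj) (i := p)
    rw [hnil] at this
    simp at this
    omega
  · rw [List.head?_drop]
    intro hsome
    have hc : tj[p]? = some '[' := hsome
    have hmem : '[' ∈ tj.tail := by
      cases tj with
      | nil => simp at hp
      | cons a tl =>
        obtain ⟨q, rfl⟩ : ∃ q, p = q + 1 := ⟨p - 1, by omega⟩
        have : tl[q]? = some '[' := by simpa using hc
        exact List.mem_of_getElem? this
    exact hj3 '[' hmem rfl

-- no token matches anywhere inside an inserted replacement (replacements carry no '[')
theorem pv_no_match_inside_rep {ti r w : List Char} {p : Nat}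
    (hi : pvGoodTok ti = true) (hr : pvGoodRep r = true)
    (hp : p < r.length) : ¬ ti <+: (r.drop p ++ w) := by
  obtain ⟨hi1, hi2, -, -⟩ := pvGoodTok_iff.mp hi
  obtain ⟨-, -, hr3⟩ := pvGoodRep_iff.mp hr
  apply pv_not_prefix_of_head hi2
  · intro hnil
    have := List.length_drop (l := r) (i := p)
    rw [hnil] at this
    simp at this
    omega
  · rw [List.head?_drop]
    intro hsome
    exact hr3 '[' (List.mem_of_getElem? hsome) rfl

-- a newline-free list is a prefix of `pvRep1 old r u` only if it is a prefix of u
theorem pv_prefix_through_rep1 {r : List Char} (hr : pvGoodRep r = true)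
    (old : List Char) :
    ∀ (u τ : List Char), (∀ c ∈ τ, c ≠ '\n') → τ <+: pvRep1 old r u → τ <+: u := by
  intro u
  induction u with
  | nil => intro τ _; rw [pvRep1_nil]; exact fun h => h.trans (List.nil_prefix)
  | cons c cs ih =>
    intro τ hτ h
    by_cases hpre : old.isPrefixOf (c :: cs) = true
    · rw [pvRep1_cons_pos _ hpre] at h
      cases τ with
      | nil => exact List.nil_prefix
      | cons a τ' =>
        obtain ⟨hr1, hr2, -⟩ := pvGoodRep_iff.mp hr
        cases r with
        | nil => exact absurd rfl hr1
        | cons b r' =>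
          simp only [List.head?_cons, Option.some.injEq] at hr2
          subst hr2
          simp only [List.cons_append, List.cons_prefix_cons] at h
          exact absurd h.1 (hτ a List.mem_cons_self)
    · rw [pvRep1_cons_neg _ hpre] at h
      cases τ with
      | nil => exact List.nil_prefix
      | cons a τ' =>
        simp only [List.cons_prefix_cons] at h
        obtain ⟨rfl, h2⟩ := h
        have := ih τ' (fun c hc => hτ c (List.mem_cons_of_mem _ hc)) h2
        exact List.cons_prefix_cons.mpr ⟨rfl, this⟩

-- ---- pass-through lemmas ----
theorem pvRep1_append (old new : List Char) :
    ∀ (x w : List Char), (∀ p, p < x.length → ¬ old <+: (x.drop p ++ w)) →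
      pvRep1 old new (x ++ w) = x ++ pvRep1 old new w := by
  intro x
  induction x with
  | nil => intro w _; rfl
  | cons c x' ih =>
    intro w hno
    have h0 : ¬ old.isPrefixOf (c :: (x' ++ w)) = true := by
      intro hc
      exact hno 0 (by simp) (by simpa using List.isPrefixOf_iff_prefix.mp hc)
    rw [List.cons_append, pvRep1_cons_neg _ h0, ih w (fun p hp => by
      have := hno (p + 1) (by simp; omega)
      simpa using this)]
    simp

theorem pvScan_append (T : List (List Char × List Char)) :
    ∀ (x w : List Char), (∀ p, p < x.length → pvFindTok T (x.drop p ++ w) = none) →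
      pvScan T (x ++ w) = x ++ pvScan T w := by
  intro x
  induction x with
  | nil => intro w _; rfl
  | cons c x' ih =>
    intro w hno
    have h0 : pvFindTok T (c :: (x' ++ w)) = none := by simpa using hno 0 (by simp)
    rw [List.cons_append, pvScan_cons_none h0, ih w (fun p hp => by
      have := hno (p + 1) (by simp; omega)
      simpa using this)]
    simp

-- pvFindTok on `tok ++ anything` does not depend on the tail
theorem pvFindTok_stable {T : List (List Char × List Char)} (hT : pvGoodTab T)
    {tk rk : List Char} {u : List Char} (h : pvFindTok T (tk ++ u) = some (tk, rk)) :
    ∀ w, pvFindTok T (tk ++ w) = some (tk, rk) := by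
  induction T with
  | nil => simp [pvFindTok] at h
  | cons q rest ih =>
    obtain ⟨t1, r1⟩ := q
    intro w
    by_cases h1 : t1.isPrefixOf (tk ++ u)
    · simp only [pvFindTok, if_pos h1] at h
      obtain ⟨rfl, rfl⟩ : t1 = tk ∧ r1 = rk := by
        cases h; exact ⟨rfl, rfl⟩
      simp [pvFindTok, List.isPrefixOf_iff_prefix.mpr (List.prefix_append _ w)]
    · simp only [pvFindTok, if_neg h1] at h
      obtain ⟨hmem, -⟩ := pvFindTok_mem h
      have hrel := (List.pairwise_cons.mp hT.2).1 (tk, rk) hmem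
      have h1w : ¬ t1.isPrefixOf (tk ++ w) = true := by
        intro hc
        rcases List.prefix_or_prefix_of_prefix (List.isPrefixOf_iff_prefix.mp hc)
          (tk.prefix_append w) with hp | hp
        · exact hrel.1 hp
        · exact hrel.2 hp
      rw [pvFindTok, if_neg h1w]
      exact ih ⟨fun p hp => hT.1 p (List.mem_cons_of_mem _ hp),
        (List.pairwise_cons.mp hT.2).2⟩ h w

-- scanning a string that starts with a recognised token
theorem pvScan_token {T : List (List Char × List Char)} {tk rk w : List Char}
    (htk : tk ≠ []) (h : pvFindTok T (tk ++ w) = some (tk, rk)) :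
    pvScan T (tk ++ w) = rk ++ pvScan T w := by
  cases tk with
  | nil => exact absurd rfl htk
  | cons a tk' =>
    rw [List.cons_append, pvScan_cons_some (by simpa using h)]
    simp

-- drop over a nonempty-token prefix of a cons
theorem pv_drop_tok {c : Char} {cs t : List Char} (ht : t ≠ []) :
    cs.drop (t.length - 1) = (c :: cs).drop t.length := by
  cases t with
  | nil => exact absurd rfl ht
  | cons a t' => simp

-- ---- the key step: one table pass absorbs one replace pass ----
theorem pvScan_cons_table {t r : List Char} {T : List (List Char × List Char)}
    (hg : pvGoodTab ((t, r) :: T)) :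
    ∀ s, pvScan ((t, r) :: T) s = pvScan T (pvRep1 t r s) := by
  have hgt : pvGoodTok t = true := (hg.1 (t, r) List.mem_cons_self).1
  have hgr : pvGoodRep r = true := (hg.1 (t, r) List.mem_cons_self).2
  have hT : pvGoodTab T :=
    ⟨fun p hp => hg.1 p (List.mem_cons_of_mem _ hp), (List.pairwise_cons.mp hg.2).2⟩
  intro s
  induction s using pvScan.induct ((t, r) :: T) with
  | case1 => rw [pvScan_nil, pvRep1_nil, pvScan_nil]
  | case2 c cs t' r' hfind ih =>
    by_cases hpre : t.isPrefixOf (c :: cs) = true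
    · -- the head token matches: both sides emit r
      have ht : t ≠ [] := (pvGoodTok_iff.mp hgt).1
      obtain ⟨rfl, rfl⟩ : t = t' ∧ r = r' := by
        rw [pvFindTok, if_pos hpre] at hfind
        cases hfind; exact ⟨rfl, rfl⟩
      rw [pvScan_cons_some hfind, pvRep1_cons_pos _ hpre]
      rw [pvScan_append T r _ (fun p hp => pvFindTok_none_iff.mpr
        (fun q hq => pv_no_match_inside_rep ((hT.1 q hq).1) hgr hp))]
      rw [ih]
    · -- a token of T matches: rep1 walks through it unchanged
      have hfindT : pvFindTok T (c :: cs) = some (t', r') := by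
        rwa [pvFindTok, if_neg hpre] at hfind
      obtain ⟨hmem, hpfx⟩ := pvFindTok_mem hfindT
      have hgt' : pvGoodTok t' = true := (hT.1 (t', r') hmem).1
      have ht' : t' ≠ [] := (pvGoodTok_iff.mp hgt').1
      obtain ⟨u, hu⟩ := hpfx
      have hdrop : cs.drop (t'.length - 1) = u := by
        rw [pv_drop_tok (c := c) ht', ← hu]
        simp
      rw [pvScan_cons_some hfind, hdrop, ← hu]
      rw [pvRep1_append t r t' u (fun p hp => by
        rcases Nat.eq_zero_or_pos p with rfl | hp1
        · rw [List.drop_zero, hu]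
          intro hc
          exact hpre (List.isPrefixOf_iff_prefix.mpr hc)
        · exact pv_no_match_inside_tok hgt hgt' hp1 hp)]
      have hstable := pvFindTok_stable hT (by rw [hu]; exact hfindT) (pvRep1 t r u)
      rw [pvScan_token ht' hstable, ← hdrop, ih, hdrop]
  | case3 c cs hfind ih =>
    have hnone : ∀ p ∈ (t, r) :: T, ¬ p.1 <+: (c :: cs) := pvFindTok_none_iff.mp hfind
    have hpre : ¬ t.isPrefixOf (c :: cs) = true := fun hc =>
      hnone (t, r) List.mem_cons_self (List.isPrefixOf_iff_prefix.mp hc)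
    rw [pvScan_cons_none hfind, pvRep1_cons_neg _ hpre]
    have hTnone : pvFindTok T (c :: pvRep1 t r cs) = none := by
      apply pvFindTok_none_iff.mpr
      rintro ⟨ti, ri⟩ hq hc
      have hgi : pvGoodTok ti = true := (hT.1 (ti, ri) hq).1
      obtain ⟨hi1, -, -, hi4⟩ := pvGoodTok_iff.mp hgi
      cases ti with
      | nil => exact absurd rfl hi1
      | cons a τ =>
        rw [List.cons_prefix_cons] at hc
        obtain ⟨rfl, hτ⟩ := hc
        have : τ <+: cs := pv_prefix_through_rep1 hgr t cs τ
          (fun x hx => hi4 x (List.mem_cons_of_mem _ hx)) hτ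
        exact hnone (a :: τ, ri) (List.mem_cons_of_mem _ hq)
          (List.cons_prefix_cons.mpr ⟨rfl, this⟩)
    rw [pvScan_cons_none hTnone, ih]

theorem pvScan_nil_table : ∀ s, pvScan ([] : List (List Char × List Char)) s = s := by
  intro s
  induction s with
  | nil => exact pvScan_nil []
  | cons c cs ih => rw [pvScan_cons_none (by rw [pvFindTok]), ih]

theorem pv_main (T : List (List Char × List Char)) (h : pvGoodTab T) :
    ∀ s, List.foldl (fun s p => pvRep1 p.1 p.2 s) s T = pvScan T s := by
  induction T with
  | nil => intro s; rw [List.foldl_nil, pvScan_nil_table]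
  | cons q rest ih =>
    obtain ⟨t, r⟩ := q
    intro s
    have hT : pvGoodTab rest :=
      ⟨fun p hp => h.1 p (List.mem_cons_of_mem _ hp), (List.pairwise_cons.mp h.2).2⟩
    rw [List.foldl_cons, ih hT (pvRep1 t r s), ← pvScan_cons_table h s]

theorem pv_mid_eq (s : List Char) :
    PySem.Chars.replace
      (PySem.Chars.replace
        (PySem.Chars.replace
          (PySem.Chars.replace
            (PySem.Chars.replace
              (PySem.Chars.replace
                (PySem.Chars.replace
                  (PySem.Chars.replace s "[SCENE]".toList "\nSCENE: ".toList)
                  "[/SCENE]".toList "\n".toList)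
                "[ACTION]".toList "\nACTION: ".toList)
              "[/ACTION]".toList "\n".toList)
            "[CHARACTER]".toList "\nCHARACTER: ".toList)
          "[/CHARACTER]".toList "\n".toList)
        "[DIALOGUE]".toList "\nDIALOGUE: ".toList)
      "[/DIALOGUE]".toList "\n".toList = pvScan pvTable s := by
  rw [pvReplace_eq _ _ _ (by decide), pvReplace_eq _ _ _ (by decide),
      pvReplace_eq _ _ _ (by decide), pvReplace_eq _ _ _ (by decide),
      pvReplace_eq _ _ _ (by decide), pvReplace_eq _ _ _ (by decide),
      pvReplace_eq _ _ _ (by decide), pvReplace_eq _ _ _ (by decide)]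
  have h := pv_main pvTable (by constructor <;> decide) s
  simpa [pvTable, List.foldl] using h

-- ===== VERDICT (by name: the statement is the Claim_ definition above) =====
theorem format_script_for_display_spec : Claim_equal_format_script_for_display := by
  intro script _
  unfold Spec_format_script_for_display format_script_for_display format_script_for_display_alt
  dsimp only
  rw [pv_mid_eq]
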